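-- pv_equiv track=rewrite | github.com/LichHunter/personal-library-manager | poc/poc-1c-scalable-ner/hybrid_ner.py | _suppress_subspans
-- ===== SOURCE A (Python) =====
-- def _suppress_subspans(extracted: list[str]) -> list[str]:
--     """Remove terms that are substrings of other extracted terms.
--
--     Only suppresses when the shorter term is a non-word-boundary substring
--     (e.g., "getInputSizes" inside "getInputSizes(ImageFormat...)") or when
--     a single word appears inside a 3+-word compound. Preserves both forms
--     for 2-word pairs like "Right" / "arrow right".
--     """
--     if not extracted:
--         return extracted
--
--     lower_terms = [(t, t.lower()) for t in extracted]
--     kept: list[str] = []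
--
--     for term, term_lower in lower_terms:
--         if len(term) <= 3:
--             kept.append(term)
--             continue
--
--         is_subspan = False
--         for other, other_lower in lower_terms:
--             if term_lower == other_lower:
--                 continue
--             if term_lower not in other_lower or len(term_lower) >= len(other_lower):
--                 continue
--
--             shorter_words = term_lower.split()
--             longer_words = other_lower.split()
--
--             if len(shorter_words) == 1 and len(longer_words) == 2:
--                 continue
--
--             is_subspan = True
--             break
--
--         if not is_subspan:
--             kept.append(term)
--
--     return kept
-- ===== SOURCE B (Python) =====
-- def _suppress_subspans(extracted: list[str]) -> list[str]:
--     # Staged: dedup the lowercase forms, sort them by length ascending, and test each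
--     # distinct string only against the strictly longer candidates after it in the sorted
--     # order, memoizing the verdict in a dict consulted by the final filter pass.
--     lows = [t.lower() for t in extracted]
--     uniq = sorted(dict.fromkeys(lows), key=len)
--     words = [len(s.split()) for s in uniq]
--     covered = {}
--     for i, s in enumerate(uniq):
--         w1 = words[i] == 1
--         covered[s] = any(len(o) > len(s) and s in o and not (w1 and wo == 2)
--                          for o, wo in zip(uniq[i + 1:], words[i + 1:]))
--     return [t for t, s in zip(extracted, lows) if len(t) <= 3 or not covered[s]]
-- ===== Notes on version B (the rewrite author's own statement) =====
-- stated objective: faster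
-- what changed: B replaces A's per-term rescan of the whole list with staged passes: it dedups the lowercase forms, sorts them by length ascending so each distinct string is tested only against the strictly longer candidates after it, memoizes each verdict in a dict, and filters the original list by dict lookup.
import Mathlib
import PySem

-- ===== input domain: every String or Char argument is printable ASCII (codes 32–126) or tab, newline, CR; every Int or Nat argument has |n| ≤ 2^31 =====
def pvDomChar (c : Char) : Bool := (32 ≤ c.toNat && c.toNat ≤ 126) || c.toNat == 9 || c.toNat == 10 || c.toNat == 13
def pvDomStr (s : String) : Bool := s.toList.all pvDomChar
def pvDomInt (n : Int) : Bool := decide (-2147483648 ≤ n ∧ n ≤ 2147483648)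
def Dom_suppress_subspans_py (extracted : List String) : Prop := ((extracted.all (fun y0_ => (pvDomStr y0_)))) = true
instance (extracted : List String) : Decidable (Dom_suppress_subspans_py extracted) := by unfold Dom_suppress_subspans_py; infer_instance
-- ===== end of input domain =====

-- B re-implements the suppression in stages: dedup the lowercase forms, sort them by length
-- ascending, test each distinct string only against the strictly longer candidates after it in
-- the sorted order, and memoize the verdict in a dict consulted by a final filter pass.

-- ===== PORT A =====
-- inner 'for other, other_lower in lower_terms: … break' loop, returning is_subspan
def aInner (lower_terms : List (String × String)) (tl : String) : Bool :=
  match lower_terms with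
  | [] => false
  | (_, ol) :: rest =>
    if tl == ol then aInner rest tl
    else if !(PySem.Str.isIn tl ol) || decide (PySem.Str.len tl ≥ PySem.Str.len ol) then
      aInner rest tl
    else if (PySem.Str.split₀ tl).length == 1 && (PySem.Str.split₀ ol).length == 2 then
      aInner rest tl
    else true

def suppress_subspans_py (extracted : List String) : List String :=
  if extracted = [] then extracted
  else
    let lower_terms := extracted.map (fun t => (t, PySem.Str.lower t))
    lower_terms.foldl (fun kept p =>
      if decide (PySem.Str.len p.1 ≤ 3) then kept ++ [p.1]
      else if aInner lower_terms p.2 then kept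
      else kept ++ [p.1]) []

-- ===== PORT B =====
-- the loop body's covered-value for the string at index i of uniq (the two [i+1:] slices, zipped)
def bVal (uniq : List String) (words : List Nat) (s : String) (i : Nat) : Bool :=
  let w1 := words.getD i 0 == 1
  ((uniq.drop (i + 1)).zip (words.drop (i + 1))).any (fun q =>
    decide (PySem.Str.len q.1 > PySem.Str.len s) && PySem.Str.isIn s q.1 && !(w1 && q.2 == 2))

def suppress_subspans_py_alt (extracted : List String) : List String :=
  let lows := extracted.map PySem.Str.lower
  let uniq := PySem.List.sorted (PySem.List.dedup lows) (fun s => PySem.Str.len s) false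
  let words := uniq.map (fun s => (PySem.Str.split₀ s).length)
  let covered := uniq.zipIdx.foldl
    (fun d p => d.insert p.1 (bVal uniq words p.1 p.2)) PySem.Dict.empty
  -- covered[s]: the key is always present (uniq lists every distinct element of lows), so getD is exact
  ((extracted.zip lows).filter (fun p =>
    decide (PySem.Str.len p.1 ≤ 3) || !(covered.getD p.2 false))).map (·.1)

-- ===== PRECONDITION & SPEC =====
def Spec_suppress_subspans_py (extracted : List String) (out : List String) : Prop := out = suppress_subspans_py_alt extracted
instance (extracted : List String) (out : List String) : Decidable (Spec_suppress_subspans_py extracted out) := by unfold Spec_suppress_subspans_py; infer_instance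

-- ===== CLAIM (what is proved, stated in full; the proofs are below) =====
def Claim_equal_suppress_subspans_py : Prop := ∀ (extracted : List String), Dom_suppress_subspans_py extracted → Spec_suppress_subspans_py extracted (suppress_subspans_py extracted)

-- ===== LEMMAS AND PROOFS =====

-- the pure per-pair containment condition both programs implement
def pvCond (s o : String) : Bool :=
  decide (PySem.Str.len s < PySem.Str.len o) && PySem.Str.isIn s o &&
    !((PySem.Str.split₀ s).length == 1 && (PySem.Str.split₀ o).length == 2)

-- A's break-loop is an `any` of pvCond over the lowercase forms (tl = ol kills the strict length test)
lemma aInner_eq_any (l : List (String × String)) (tl : String) :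
    aInner l tl = l.any (fun p => pvCond tl p.2) := by
  induction l with
  | nil => rfl
  | cons p rest ih =>
    obtain ⟨o, ol⟩ := p
    rw [List.any_cons, ← ih]
    show (if tl == ol then aInner rest tl
      else if !(PySem.Str.isIn tl ol) || decide (PySem.Str.len tl ≥ PySem.Str.len ol) then
        aInner rest tl
      else if (PySem.Str.split₀ tl).length == 1 && (PySem.Str.split₀ ol).length == 2 then
        aInner rest tl
      else true) = (pvCond tl ol || aInner rest tl)
    by_cases h1 : tl = ol
    · subst h1
      simp [pvCond]
    · have hb : (tl == ol) = false := by simp [h1]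
      rw [hb]
      simp only [Bool.false_eq_true, if_false]
      cases hin : PySem.Str.isIn tl ol with
      | false =>
        simp only [pvCond, hin]
        simp
      | true =>
        cases hge : decide (PySem.Str.len tl ≥ PySem.Str.len ol) with
        | true =>
          have h2 : decide (PySem.Str.len tl < PySem.Str.len ol) = false := by
            simp at hge ⊢
            omega
          simp only [pvCond, h2, hin]
          simp
        | false =>
          cases hsp : ((PySem.Str.split₀ tl).length == 1 && (PySem.Str.split₀ ol).length == 2) with
          | true =>
            simp only [pvCond, hsp, hin]
            simp
          | false =>
            have h2 : decide (PySem.Str.len tl < PySem.Str.len ol) = true := by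
              simp at hge ⊢
              omega
            simp only [pvCond, h2, hin, hsp]
            simp

lemma zip_map_self {α β : Type} (l : List α) (g : α → β) :
    l.zip (l.map g) = l.map (fun t => (t, g t)) := by
  induction l with
  | nil => rfl
  | cons x xs ih => simp [ih]

-- membership-equal lists give the same `any`
lemma any_congr_mem {α : Type} {xs ys : List α} (h : ∀ a, a ∈ xs ↔ a ∈ ys) (p : α → Bool) :
    xs.any p = ys.any p := by
  rcases hx : xs.any p
  · rcases hy : ys.any p
    · rfl
    · simp only [List.any_eq_true] at hy
      obtain ⟨a, ha, hp⟩ := hy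
      have := List.any_eq_true.mpr ⟨a, (h a).mpr ha, hp⟩
      simp [this] at hx
  · symm
    simp only [List.any_eq_true] at hx ⊢
    obtain ⟨a, ha, hp⟩ := hx
    exact ⟨a, (h a).mp ha, hp⟩

-- a fold of inserts is unchanged at a key it never touches
lemma getD_foldl_insert_not_mem (ps : List (String × Nat)) (v : String → Nat → Bool)
    (d : PySem.Dict String Bool) (k : String) (hk : k ∉ ps.map (·.1)) :
    (ps.foldl (fun d p => d.insert p.1 (v p.1 p.2)) d).getD k false = d.getD k false := by
  induction ps generalizing d with
  | nil => rfl
  | cons p rest ih =>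
    simp only [List.map_cons, List.mem_cons, not_or] at hk
    rw [List.foldl_cons, ih _ hk.2, PySem.Dict.getD_insert]
    simp [hk.1]

-- a fold of inserts over nodup keys returns the value inserted for the key
lemma getD_foldl_insert_nodup (ps : List (String × Nat)) (v : String → Nat → Bool)
    (d : PySem.Dict String Bool) (k : String) (i : Nat)
    (hnd : (ps.map (·.1)).Nodup) (hmem : (k, i) ∈ ps) :
    (ps.foldl (fun d p => d.insert p.1 (v p.1 p.2)) d).getD k false = v k i := by
  induction ps generalizing d with
  | nil => cases hmem
  | cons p rest ih =>
    simp only [List.map_cons, List.nodup_cons] at hnd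
    rcases List.mem_cons.mp hmem with h | h
    · rw [List.foldl_cons]
      have hk : k ∉ rest.map (·.1) := by
        rw [show k = p.1 by rw [← h]]
        exact hnd.1
      rw [getD_foldl_insert_not_mem _ _ _ _ hk, ← h]
      exact PySem.Dict.getD_insert_self _ _ _ _
    · rw [List.foldl_cons]
      exact ih _ hnd.2 h

-- bVal at s's own index equals the full `any` over lows: slots ≤ i are not strictly longer
lemma bVal_eq_any (lows : List String) (i : Nat)
    (h : i < (PySem.List.sorted (PySem.List.dedup lows) (fun s => PySem.Str.len s) false).length) :
    bVal (PySem.List.sorted (PySem.List.dedup lows) (fun s => PySem.Str.len s) false)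
      ((PySem.List.sorted (PySem.List.dedup lows) (fun s => PySem.Str.len s) false).map
        (fun s => (PySem.Str.split₀ s).length))
      ((PySem.List.sorted (PySem.List.dedup lows) (fun s => PySem.Str.len s) false)[i]) i
    = lows.any (fun o =>
        pvCond ((PySem.List.sorted (PySem.List.dedup lows) (fun s => PySem.Str.len s) false)[i]) o) := by
  set L := PySem.List.sorted (PySem.List.dedup lows) (fun s => PySem.Str.len s) false with hL
  set s := L[i] with hs
  have hw : (L.map (fun s => (PySem.Str.split₀ s).length)).getD i 0
      = (PySem.Str.split₀ s).length := by
    rw [List.getD_eq_getElem?_getD, List.getElem?_map, List.getElem?_eq_getElem h]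
    rfl
  unfold bVal
  rw [hw, ← List.map_drop, zip_map_self, List.any_map]
  have hdrop : (L.drop (i + 1)).any (fun o => pvCond s o)
      = L.any (fun o => pvCond s o) := by
    conv_rhs => rw [← List.take_append_drop (i + 1) L]
    rw [List.any_append]
    have htake : (L.take (i + 1)).any (fun o => pvCond s o) = false := by
      rw [List.any_eq_false]
      intro o ho
      rw [List.mem_take_iff_getElem] at ho
      obtain ⟨j, hj, he⟩ := ho
      have hj' : j < L.length := by omega
      have hji : j ≤ i := by omega
      have hmono := PySem.List.key_sorted_getElem_mono (key := fun s => PySem.Str.len s)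
        (xs := PySem.List.dedup lows) hji h
      have hnl : ¬ (PySem.Str.len s < PySem.Str.len o) := by
        rw [← he]
        simp only [hs]
        exact not_lt.mpr hmono
      simp only [pvCond, decide_eq_false hnl]
      simp
    rw [htake, Bool.false_or]
  have hfun : ((fun q => decide (PySem.Str.len q.1 > PySem.Str.len s) && PySem.Str.isIn s q.1 &&
        !(((PySem.Str.split₀ s).length == 1) && (q.2 == 2))) ∘
        (fun t => (t, (PySem.Str.split₀ t).length))) = fun o => pvCond s o := by
    funext o
    simp only [Function.comp_apply, pvCond, gt_iff_lt]
  rw [hfun, hdrop]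
  apply any_congr_mem
  intro a
  rw [hL, PySem.List.mem_sorted, PySem.List.mem_dedup]

-- B's memo dict looked up at any lowercase form is the `any` of pvCond over all lowercase forms
lemma covered_getD (lows : List String) (s : String) (hs : s ∈ lows) :
    ((PySem.List.sorted (PySem.List.dedup lows) (fun s => PySem.Str.len s) false).zipIdx.foldl
        (fun d p => d.insert p.1
          (bVal (PySem.List.sorted (PySem.List.dedup lows) (fun s => PySem.Str.len s) false)
            ((PySem.List.sorted (PySem.List.dedup lows) (fun s => PySem.Str.len s) false).map
              (fun s => (PySem.Str.split₀ s).length)) p.1 p.2)) PySem.Dict.empty).getD s false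
    = lows.any (fun o => pvCond s o) := by
  set L := PySem.List.sorted (PySem.List.dedup lows) (fun s => PySem.Str.len s) false with hL
  have hsL : s ∈ L := by
    rw [hL, PySem.List.mem_sorted, PySem.List.mem_dedup]
    exact hs
  obtain ⟨i, hi, he⟩ := List.mem_iff_getElem.mp hsL
  have hnd : (L.zipIdx.map (·.1)).Nodup := by
    rw [List.zipIdx_map_fst]
    exact (PySem.List.sorted_perm _ _ _).nodup_iff.mpr (PySem.List.nodup_dedup lows)
  have hmem : (s, i) ∈ L.zipIdx := by
    rw [← he]
    simp [List.mem_zipIdx_iff_getElem?, List.getElem?_eq_getElem hi]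
  rw [getD_foldl_insert_nodup _ _ _ _ i hnd hmem, ← he]
  rw [← he] at *
  exact bVal_eq_any lows i hi

lemma filter_shape (extracted : List String) :
    suppress_subspans_py extracted = suppress_subspans_py_alt extracted := by
  by_cases he : extracted = []
  · subst he; rfl
  · unfold suppress_subspans_py suppress_subspans_py_alt
    rw [if_neg he]
    dsimp only
    rw [zip_map_self]
    have hA : ∀ (kept : List String) (p : String × String),
        p ∈ extracted.map (fun t => (t, PySem.Str.lower t)) →
        (if decide (PySem.Str.len p.1 ≤ 3) then kept ++ [p.1]
         else if aInner (extracted.map (fun t => (t, PySem.Str.lower t))) p.2 then kept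
         else kept ++ [p.1])
        = (if (decide (PySem.Str.len p.1 ≤ 3) ||
              !aInner (extracted.map (fun t => (t, PySem.Str.lower t))) p.2) then kept ++ [p.1]
           else kept) := by
      intro kept p _
      simp only [PySem.Str.len_eq]
      by_cases hc : ((p.1.length : Int) ≤ 3)
      · simp [hc]
      · cases ha : aInner (extracted.map (fun t => (t, PySem.Str.lower t))) p.2 <;>
          simp [hc]
    rw [PySem.List.foldl_congr_mem (h := hA)]
    rw [PySem.List.foldl_append_if]
    rw [List.filter_map, List.map_map, List.filter_map, List.map_map]
    simp only [List.nil_append]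
    congr 1
    apply List.filter_congr
    intro t ht
    dsimp only [Function.comp]
    rw [aInner_eq_any, List.any_map]
    have hany : (extracted.any ((fun p => pvCond (PySem.Str.lower t) p.2) ∘
        (fun t => (t, PySem.Str.lower t))))
        = (extracted.map PySem.Str.lower).any (fun o => pvCond (PySem.Str.lower t) o) := by
      rw [List.any_map]
      rfl
    rw [hany, ← covered_getD (extracted.map PySem.Str.lower) (PySem.Str.lower t)
      (List.mem_map.mpr ⟨t, ht, rfl⟩)]

-- ===== VERDICT (by name: the statement is the Claim_ definition above) =====
theorem suppress_subspans_py_spec : Claim_equal_suppress_subspans_py := by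
  intro extracted _
  unfold Spec_suppress_subspans_py
  exact filter_shape extracted
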